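-- pv_equiv track=rewrite | github.com/Wojti-7/logia | Inne/klocki.py | tablica
-- ===== SOURCE A (Python) =====
-- def wyczysc(w):
--     # for i in range(len(w)-1, 0, -1):
--     #     if (len(w[i]) == 0):
--     #         w.pop(i)
--     # while len(w[len(w)-1]) == 0:
--     # w[-1] -- ostatni element w
--     while len(w[-1]) == 0:
--         w.pop()
--     return w
--
-- def tablica(n):
--     w = [''] * len(n)
--     i = 0
--     j = 0
--     dlugosc_klocka = 1
--     while True:
--         # wstawiam
--         w[j] = w[j] + n[i]
--         # przesuwam
--         i = i+1
--         if (i >= len(n)):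
--             return wyczysc(w)
--         j = j+1
--         if (j >= dlugosc_klocka):
--             j = 0
--             dlugosc_klocka = dlugosc_klocka+1
--     return wyczysc(w)
-- ===== SOURCE B (Python) =====
-- def tablica(n):
--     rows = []
--     L = 1
--     while n:
--         block, n = n[:L], n[L:]
--         rows = ([r + c for r, c in zip(rows, block)]
--                 + list(block[len(rows):])
--                 + rows[len(block):])
--         L += 1
--     return rows
-- ===== Notes on version B (the rewrite author's own statement) =====
-- stated objective: simpler
-- what changed: A preallocates len(n) rows and distributes characters one at a time with a flat counter state machine (char index i, row pointer j, growing block length) and finally trims trailing empty rows; B instead slices the string into blocks of length 1,2,3,... and zip-merges each whole block into a row list that grows on demand, needing no preallocation and no trimming. (constant-factor speedup: per-block slice/zip operations replace per-character interpreted bookkeeping)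
import Mathlib
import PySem

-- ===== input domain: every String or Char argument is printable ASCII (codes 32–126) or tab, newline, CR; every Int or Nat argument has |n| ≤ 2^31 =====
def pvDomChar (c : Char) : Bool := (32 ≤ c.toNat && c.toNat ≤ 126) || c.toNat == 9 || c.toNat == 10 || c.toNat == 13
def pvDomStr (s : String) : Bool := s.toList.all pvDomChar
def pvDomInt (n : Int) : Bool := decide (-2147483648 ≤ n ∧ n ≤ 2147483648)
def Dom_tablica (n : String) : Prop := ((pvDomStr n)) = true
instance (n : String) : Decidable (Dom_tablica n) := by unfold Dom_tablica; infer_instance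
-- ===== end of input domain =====

-- B replaces A's preallocated array + flat counter state machine (char pointer i, row
-- pointer j, block length, final trim of trailing empty rows) by a block-at-a-time
-- zip-merge that grows the row list on demand and needs no trimming (objective: simpler).

-- ===== PORT A =====
-- Python strings are modelled as List Char; String.ofList is applied to the rows at the end.
-- wyczysc: `while len(w[-1]) == 0: w.pop()` — pops trailing empty rows one by one. Exact
-- whenever w contains a nonempty row (always the case where A calls it on a Pre_ input;
-- on an all-empty w Python raises IndexError, which Pre_ keeps unreachable).
def wyczysc (w : List (List Char)) : List (List Char) :=
  ((w.reverse).dropWhile (fun s => s.length == 0)).reverse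

-- the `while True` loop of tablica; the List Char argument is n[i:], j and dlugosc_klocka as in A.
def tablicaLoopA : List (List Char) → List Char → Nat → Nat → List (List Char)
  | w, [], _, _ => wyczysc w        -- unreachable under Pre_ (the loop is entered with i < len(n))
  | w, c :: rest, j, L =>
    let w' := w.set j (w.getD j [] ++ [c])      -- w[j] = w[j] + n[i]  (j < len(w) throughout)
    match rest with
    | [] => wyczysc w'                          -- i >= len(n): return wyczysc(w)
    | _ :: _ =>
      if j + 1 ≥ L then tablicaLoopA w' rest 0 (L + 1)    -- j >= dlugosc_klocka after j = j+1
      else tablicaLoopA w' rest (j + 1) L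

def tablica (n : String) : List String :=
  (tablicaLoopA (List.replicate n.toList.length []) n.toList 0 1).map String.ofList

-- ===== PORT B =====
-- one block merge:  [r+c for r,c in zip(rows, block)] + list(block[len(rows):]) + rows[len(block):]
def addBlock (rows : List (List Char)) (block : List Char) : List (List Char) :=
  List.zipWith (fun r c => r ++ [c]) rows block
    ++ (block.drop rows.length).map (fun c => [c])
    ++ rows.drop block.length

-- the `while n:` loop of B; Lp + 1 is B's block length L (which starts at 1).
def tablicaAltLoop : List (List Char) → List Char → Nat → List (List Char)
  | rows, [], _ => rows
  | rows, c :: cs, Lp =>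
    tablicaAltLoop (addBlock rows ((c :: cs).take (Lp + 1))) ((c :: cs).drop (Lp + 1)) (Lp + 1)
  termination_by _ cs _ => cs.length
  decreasing_by simp

def tablica_alt (n : String) : List String :=
  (tablicaAltLoop [] n.toList 0).map String.ofList

-- ===== PRECONDITION & SPEC =====
-- Pre_ excludes only the empty string, on which A raises IndexError (w[0] on the empty w).
def Pre_tablica (n : String) : Prop := n ≠ ""
instance (n : String) : Decidable (Pre_tablica n) := by unfold Pre_tablica; infer_instance
def pvWitness_tablica : String := "abcdef"

def Spec_tablica (n : String) (out : List String) : Prop := out = tablica_alt n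
instance (n : String) (out : List String) : Decidable (Spec_tablica n out) := by unfold Spec_tablica; infer_instance

-- ===== CLAIM (what is proved, stated in full; the proofs are below) =====
def Claim_equal_tablica : Prop := ∀ (n : String), Dom_tablica n → Pre_tablica n → Spec_tablica n (tablica n)

-- ===== LEMMAS AND PROOFS =====

-- A writes one block into rows j, j+1, … of its preallocated array; setBlock captures that.
def setBlock : List (List Char) → List Char → Nat → List (List Char)
  | w, [], _ => w
  | w, c :: more, j => setBlock (w.set j (w.getD j [] ++ [c])) more (j + 1)

theorem tablicaLoopA_block : ∀ (chars cs : List Char) (w : List (List Char)) (j L : Nat),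
    chars ≠ [] → (cs = [] → j + chars.length ≤ L) → (cs ≠ [] → j + chars.length = L) →
    tablicaLoopA w (chars ++ cs) j L =
      match cs with
      | [] => wyczysc (setBlock w chars j)
      | _ :: _ => tablicaLoopA (setBlock w chars j) cs 0 (L + 1)
  | [], _, _, _, _, hne, _, _ => absurd rfl hne
  | [c], cs, w, j, L, _, h1, h2 => by
    cases cs with
    | nil => simp [tablicaLoopA, setBlock]
    | cons d ds =>
      have hL : j + 1 = L := by simpa using h2 (by simp)
      simp only [List.singleton_append, tablicaLoopA, setBlock]
      rw [if_pos (by omega)]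
  | c :: c2 :: more, cs, w, j, L, _, h1, h2 => by
    have hlt : j + 1 < L := by
      rcases eq_or_ne cs [] with rfl | h
      · have := h1 rfl; simp at this; omega
      · have := h2 h; simp at this; omega
    have step : tablicaLoopA w ((c :: c2 :: more) ++ cs) j L =
        tablicaLoopA (w.set j (w.getD j [] ++ [c])) ((c2 :: more) ++ cs) (j + 1) L := by
      simp only [List.cons_append, tablicaLoopA]
      rw [if_neg (by omega)]
    rw [step, tablicaLoopA_block (c2 :: more) cs _ (j+1) L (by simp)
        (fun h => by have := h1 h; simp at this ⊢; omega)
        (fun h => by have := h2 h; simp at this ⊢; omega)]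
    rfl

theorem setBlock_closed : ∀ (chars : List Char) (w : List (List Char)) (j : Nat),
    j + chars.length ≤ w.length →
    setBlock w chars j =
      w.take j ++ List.zipWith (fun r c => r ++ [c]) (w.drop j) chars ++ w.drop (j + chars.length)
  | [], w, j, h => by simp [setBlock]
  | c :: more, w, j, h => by
    have hj : j < w.length := by simp at h; omega
    have hset : w.set j (w.getD j [] ++ [c]) = w.take j ++ (w[j] ++ [c]) :: w.drop (j + 1) := by
      rw [List.getD_eq_getElem w [] hj]
      rw [List.set_eq_take_append_cons_drop]; simp [hj]
    rw [setBlock, setBlock_closed more _ (j + 1) (by simpa [hset] using (by simp at h ⊢; omega : j + 1 + more.length ≤ w.length)), hset]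
    have hlen : (w.take j).length = j := by simp [Nat.min_eq_left hj.le]
    rw [List.drop_eq_getElem_cons hj]
    simp only [List.zipWith_cons_cons]
    -- compute take/drop of (w.take j ++ (w[j] ++ [c]) :: w.drop (j+1))
    rw [List.take_append, List.drop_append, List.drop_append]
    have e1 : List.take (j + 1) (List.take j w) = List.take j w := by
      rw [List.take_take]; congr 1; omega
    have e2 : List.drop (j + 1) (List.take j w) = ([] : List (List Char)) := by
      apply List.drop_eq_nil_of_le; simp
    have e3 : List.drop (j + 1 + more.length) (List.take j w) = ([] : List (List Char)) := by
      apply List.drop_eq_nil_of_le; simp; omega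
    have e4 : j + 1 + more.length - j = more.length + 1 := by omega
    simp [hlen, e1, e2, e3, e4, List.drop_drop]
    congr 1
    omega

theorem zipWith_append_left_of_le : ∀ (l1 l2 : List (List Char)) (l3 : List Char),
    l3.length ≤ l1.length →
    List.zipWith (fun r c => r ++ [c]) (l1 ++ l2) l3 = List.zipWith (fun r c => r ++ [c]) l1 l3
  | _, _, [], _ => by simp
  | r :: rs, l2, c :: cs, h => by
    simp only [List.cons_append, List.zipWith_cons_cons]
    rw [zipWith_append_left_of_le rs l2 cs (by simpa using h)]
  | [], l2, c :: cs, h => by simp at h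

theorem zipWith_replicate_nil : ∀ (l : List Char) (k : Nat), l.length ≤ k →
    List.zipWith (fun (r : List Char) c => r ++ [c]) (List.replicate k []) l = l.map (fun c => [c])
  | [], k, _ => by simp
  | c :: cs, k + 1, h => by
    simp only [List.replicate_succ, List.zipWith_cons_cons, List.map_cons, List.nil_append]
    rw [zipWith_replicate_nil cs k (by simpa using h)]

theorem zipWith_take_right : ∀ (l1 : List (List Char)) (l3 : List Char) (n : Nat),
    l1.length ≤ n →
    List.zipWith (fun r c => r ++ [c]) l1 (l3.take n) = List.zipWith (fun r c => r ++ [c]) l1 l3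
  | [], _, _, _ => by simp
  | r :: rs, [], n, h => by simp
  | r :: rs, c :: cs, n + 1, h => by
    simp only [List.take_succ_cons, List.zipWith_cons_cons]
    rw [zipWith_take_right rs cs n (by simpa using h)]

theorem setBlock_pad (chars : List Char) (rows : List (List Char)) (k : Nat)
    (h : chars.length ≤ rows.length + k) :
    setBlock (rows ++ List.replicate k []) chars 0 =
      addBlock rows chars ++ List.replicate (rows.length + k - max rows.length chars.length) [] := by
  rw [setBlock_closed chars _ 0 (by simp; omega)]
  simp only [List.take_zero, List.drop_zero, List.nil_append, Nat.zero_add]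
  rcases Nat.le_total chars.length rows.length with hle | hle
  · rw [zipWith_append_left_of_le rows _ chars hle, List.drop_append_of_le_length hle]
    have hdz : (chars.drop rows.length) = [] := List.drop_eq_nil_of_le hle
    simp [addBlock, hdz, Nat.max_eq_left hle]
  · have hsplit : rows ++ List.replicate k ([] : List Char) =
        (rows ++ List.replicate (chars.length - rows.length) []) ++
          List.replicate (k - (chars.length - rows.length)) [] := by
      rw [List.append_assoc, List.replicate_append_replicate]
      congr 2; omega
    rw [hsplit, zipWith_append_left_of_le _ _ chars (by simp; omega)]
    have hchars : chars = chars.take rows.length ++ chars.drop rows.length := by simp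
    have hz : List.zipWith (fun r c => r ++ [c])
        (rows ++ List.replicate (chars.length - rows.length) ([] : List Char)) chars
        = List.zipWith (fun r c => r ++ [c]) rows chars
          ++ (chars.drop rows.length).map (fun c => [c]) := by
      conv_lhs => rw [hchars]
      rw [List.zipWith_append (by simp; omega), zipWith_take_right rows chars rows.length le_rfl,
          zipWith_replicate_nil _ _ (by simp)]
    have hd : List.drop chars.length
        ((rows ++ List.replicate (chars.length - rows.length) ([] : List Char))
          ++ List.replicate (k - (chars.length - rows.length)) [])
        = List.replicate (k - (chars.length - rows.length)) ([] : List Char) :=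
      List.drop_left' (by simp; omega)
    rw [hz, hd]
    simp only [addBlock, List.drop_eq_nil_of_le hle, List.append_nil, List.append_assoc]
    congr 2
    congr 1
    omega

theorem addBlock_length (rows : List (List Char)) (block : List Char) :
    (addBlock rows block).length = max rows.length block.length := by
  simp [addBlock]; omega

theorem mem_zip_ne_nil : ∀ (rows : List (List Char)) (block : List Char) (x : List Char),
    x ∈ List.zipWith (fun r c => r ++ [c]) rows block → x ≠ []
  | r :: rs, c :: cs, x, hx => by
    rcases List.mem_cons.mp hx with rfl | hx
    · simp
    · exact mem_zip_ne_nil rs cs x hx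

theorem addBlock_no_empty (rows : List (List Char)) (block : List Char)
    (h : ∀ x ∈ rows, x ≠ []) : ∀ x ∈ addBlock rows block, x ≠ [] := by
  intro x hx
  unfold addBlock at hx
  rcases List.mem_append.mp hx with hx | hx
  · rcases List.mem_append.mp hx with hx | hx
    · exact mem_zip_ne_nil rows block x hx
    · obtain ⟨c, _, rfl⟩ := List.mem_map.mp hx
      simp
  · exact h x (List.mem_of_mem_drop hx)

theorem wyczysc_pad (rows : List (List Char)) (k : Nat) (h : ∀ x ∈ rows, x ≠ []) :
    wyczysc (rows ++ List.replicate k []) = rows := by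
  unfold wyczysc
  rw [List.reverse_append, List.reverse_replicate, List.dropWhile_append]
  have h1 : (List.replicate k ([] : List Char)).dropWhile (fun s => s.length == 0) = [] := by
    induction k with
    | zero => rfl
    | succ k ih => simp [List.replicate_succ, ih]
  rw [h1]
  simp only [List.isEmpty_nil]
  cases hr : rows.reverse with
  | nil => simp [List.reverse_eq_nil_iff.mp hr]
  | cons a tl =>
    have ha : a ∈ rows := by
      have : a ∈ rows.reverse := by rw [hr]; exact List.mem_cons_self
      simpa using this
    rw [List.dropWhile_cons]
    have hne : ¬ (a.length == 0) = true := by simp [h a ha]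
    simp only [hne]
    rw [← hr]; simp

theorem altLoop_step (rows : List (List Char)) (c : Char) (cs0 : List Char) (Lp : Nat) :
    tablicaAltLoop rows (c :: cs0) Lp =
      tablicaAltLoop (addBlock rows ((c :: cs0).take (Lp + 1))) ((c :: cs0).drop (Lp + 1)) (Lp + 1) := by
  rw [tablicaAltLoop]

theorem main_loop (N : Nat) : ∀ (cs : List Char), cs.length ≤ N → cs ≠ [] →
    ∀ (Lp : Nat) (rows : List (List Char)) (k : Nat),
      cs.length ≤ rows.length + k → (∀ x ∈ rows, x ≠ []) →
      tablicaLoopA (rows ++ List.replicate k []) cs 0 (Lp + 1) = tablicaAltLoop rows cs Lp := by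
  induction N with
  | zero =>
    intro cs hN hne
    cases cs with
    | nil => exact absurd rfl hne
    | cons c cs => simp at hN
  | succ N ih =>
    intro cs hN hne Lp rows k hlen hrows
    obtain ⟨c, cs0, rfl⟩ := List.exists_cons_of_ne_nil hne
    have hcslen : (c :: cs0).length = cs0.length + 1 := by simp
    have hclen0 : ((c :: cs0).take (Lp + 1)).length = min (Lp + 1) (cs0.length + 1) := by
      simp [List.length_take]
    have hrlen : ((c :: cs0).drop (Lp + 1)).length = cs0.length + 1 - (Lp + 1) := by
      simp [List.length_drop]
    have hsplit : (c :: cs0) = (c :: cs0).take (Lp + 1) ++ (c :: cs0).drop (Lp + 1) :=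
      (List.take_append_drop _ _).symm
    have hcne : (c :: cs0).take (Lp + 1) ≠ [] := by simp
    have hclen : ((c :: cs0).take (Lp + 1)).length ≤ rows.length + k := by
      simp at hlen; omega
    have hblock := tablicaLoopA_block ((c :: cs0).take (Lp + 1)) ((c :: cs0).drop (Lp + 1))
      (rows ++ List.replicate k []) 0 (Lp + 1)
      hcne
      (fun _ => by rw [hclen0]; omega)
      (fun hr => by
        have hlt : Lp + 1 < cs0.length + 1 := by
          by_contra hle
          exact hr (List.drop_eq_nil_of_le (by simp; omega))
        rw [hclen0]; omega)
    have hpad := setBlock_pad ((c :: cs0).take (Lp + 1)) rows k hclen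
    rw [altLoop_step]
    conv_lhs => rw [hsplit]
    rw [hblock]
    cases hr : (c :: cs0).drop (Lp + 1) with
    | nil =>
      show wyczysc (setBlock (rows ++ List.replicate k []) ((c :: cs0).take (Lp + 1)) 0)
          = tablicaAltLoop (addBlock rows ((c :: cs0).take (Lp + 1))) [] (Lp + 1)
      rw [hpad, wyczysc_pad _ _ (addBlock_no_empty rows _ hrows), tablicaAltLoop]
    | cons d ds =>
      show tablicaLoopA (setBlock (rows ++ List.replicate k []) ((c :: cs0).take (Lp + 1)) 0)
            (d :: ds) 0 (Lp + 1 + 1)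
          = tablicaAltLoop (addBlock rows ((c :: cs0).take (Lp + 1))) (d :: ds) (Lp + 1)
      rw [hpad]
      have hadd := addBlock_length rows ((c :: cs0).take (Lp + 1))
      have hds : (d :: ds).length = cs0.length + 1 - (Lp + 1) := by rw [← hr, hrlen]
      exact ih (d :: ds)
        (by rw [hds]; simp at hN; omega)
        (by simp)
        (Lp + 1)
        (addBlock rows ((c :: cs0).take (Lp + 1)))
        (rows.length + k - max rows.length ((c :: cs0).take (Lp + 1)).length)
        (by rw [hds, hadd]; simp at hlen; omega)
        (addBlock_no_empty rows _ hrows)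

-- ===== VERDICT (by name: the statement is the Claim_ definition above) =====
theorem tablica_spec : Claim_equal_tablica := by
  intro n _ hp
  unfold Spec_tablica tablica tablica_alt
  have hne : n.toList ≠ [] := fun h => hp (String.toList_eq_nil_iff.mp h)
  congr 1
  have := main_loop n.toList.length n.toList le_rfl hne 0 [] n.toList.length (by simp) (by simp)
  simpa using this
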